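-- pv_equiv track=rewrite | github.com/RadSebastian/AdventOfCode2018 | day02/part_1.py | result
-- ===== SOURCE A (Python) =====
-- def result(string):
--     count_twos = 0
--     count_threes = 0
--     dict = {}
--
--     for word in string:
--         dict[word] = 0
--
--     for key in dict:
--         for _word in string:
--             if key == _word:
--                 dict[key] += 1
--
--     for _key in dict:
--         if dict[_key] == 2:
--             count_twos = 1
--         elif dict[_key] == 3:
--             count_threes = 1
--
--     return count_twos, count_threes, dict
-- ===== SOURCE B (Python) =====
-- def result(string):
--     counts = {}
--     for word in string:
--         counts[word] = counts.get(word, 0) + 1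
--     values = counts.values()
--     count_twos = 1 if 2 in values else 0
--     count_threes = 1 if 3 in values else 0
--     return count_twos, count_threes, counts
-- ===== Notes on version B (the rewrite author's own statement) =====
-- stated objective: faster
-- what changed: B builds the counts in one pass with a get-and-increment dict and derives the flags from membership tests on the values, replacing A's build-keys-then-rescan nested loops and per-key flag loop.
import Mathlib
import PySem

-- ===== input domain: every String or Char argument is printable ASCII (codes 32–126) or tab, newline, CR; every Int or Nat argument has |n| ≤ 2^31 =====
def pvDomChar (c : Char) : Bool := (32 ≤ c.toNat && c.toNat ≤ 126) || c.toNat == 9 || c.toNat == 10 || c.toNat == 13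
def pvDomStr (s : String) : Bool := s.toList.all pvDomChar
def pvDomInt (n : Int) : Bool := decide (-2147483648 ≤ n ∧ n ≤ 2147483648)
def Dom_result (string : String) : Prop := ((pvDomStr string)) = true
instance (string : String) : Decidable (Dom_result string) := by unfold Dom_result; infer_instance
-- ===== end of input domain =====

-- B builds the counts in one pass (get-and-increment dict) and derives the flags from
-- membership tests on the values, replacing A's build-keys-then-rescan nested loops.

-- ===== PORT A =====
def result (string : String) : Int × Int × (List (String × Int)) :=
  let chars := string.toList.map (fun c => String.mk [c])
  let d0 : PySem.Dict String Int :=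
    chars.foldl (fun d word => d.insert word 0) PySem.Dict.empty
  let d1 :=
    d0.keys.foldl (fun d key =>
      chars.foldl (fun d w => if key == w then d.modify key 0 (· + 1) else d) d) d0
  let fl :=
    d1.keys.foldl (fun (p : Int × Int) k =>
      if d1.getD k 0 = 2 then ((1 : Int), p.2)
      else if d1.getD k 0 = 3 then (p.1, (1 : Int))
      else p) ((0 : Int), (0 : Int))
  (fl.1, fl.2, d1.items)

-- ===== PORT B =====
def result_alt (string : String) : Int × Int × (List (String × Int)) :=
  let counts : PySem.Dict String Int :=
    string.toList.foldl (fun d c =>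
      let word := String.mk [c]
      d.insert word (d.getD word 0 + 1)) PySem.Dict.empty
  let values := counts.values
  ((if values.contains 2 then (1 : Int) else 0),
   (if values.contains 3 then (1 : Int) else 0),
   counts.items)

-- ===== PRECONDITION & SPEC =====
def Spec_result (string : String) (out : Int × Int × (List (String × Int))) : Prop := out = result_alt string
instance (string : String) (out : Int × Int × (List (String × Int))) : Decidable (Spec_result string out) := by unfold Spec_result; infer_instance

-- ===== CLAIM (what is proved, stated in full; the proofs are below) =====
def Claim_equal_result : Prop := ∀ (string : String), Dom_result string → Spec_result string (result string)

-- ===== LEMMAS AND PROOFS =====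

-- getD stays 0 through A's zero-initialising first loop
lemma getD_foldl_insert_zero (l : List String) (v : String) :
    ∀ (d : PySem.Dict String Int), d.getD v 0 = 0 →
      (l.foldl (fun d w => d.insert w 0) d).getD v 0 = 0 := by
  induction l with
  | nil => intro d h; simpa using h
  | cons w t ih =>
    intro d h
    simp only [List.foldl_cons]
    exact ih _ (by rw [PySem.Dict.getD_insert]; split <;> simp [h])

-- inserting at an existing key keeps the key list
lemma keys_insert_of_contains (d : PySem.Dict String Int) (k : String) (v : Int)
    (h : d.contains k = true) : (d.insert k v).keys = d.keys := by
  simp only [PySem.Dict.insert, h, if_pos]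
  simp only [PySem.Dict.keys, List.map_map]
  apply List.map_congr_left
  intro p _
  by_cases hp : p.1 == k
  · simp [Function.comp, hp]; exact (eq_of_beq hp).symm
  · simp [Function.comp, hp]

lemma keys_modify_of_contains (d : PySem.Dict String Int) (k : String) (f : Int → Int)
    (h : d.contains k = true) : (d.modify k 0 f).keys = d.keys := by
  rw [PySem.Dict.keys_modify]; exact keys_insert_of_contains d k _ h

-- A's inner counting loop: value at v grows by (count of k) iff v = k
lemma inner_getD (k v : String) (l : List String) :
    ∀ (d : PySem.Dict String Int),
      (l.foldl (fun d w => if k == w then d.modify k 0 (· + 1) else d) d).getD v 0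
        = d.getD v 0 + (if v = k then (l.count k : Int) else 0) := by
  induction l with
  | nil => intro d; simp
  | cons w t ih =>
    intro d
    simp only [List.foldl_cons]
    by_cases hw : k == w
    · have hkw : k = w := eq_of_beq hw
      rw [if_pos hw, ih, PySem.Dict.getD_modify]
      by_cases hv : v = k
      · have : w == k := by simp [hkw]
        simp [hv, ← hkw]
        ring
      · simp [hv]
    · have hkw : k ≠ w := fun h => hw (by simp [h])
      rw [if_neg hw, ih]
      have : (w == k) = false := by simp; exact fun h => hkw h.symm
      simp [List.count_cons, this]

lemma inner_keys (k : String) (l : List String) :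
    ∀ (d : PySem.Dict String Int), d.contains k = true →
      (l.foldl (fun d w => if k == w then d.modify k 0 (· + 1) else d) d).keys = d.keys := by
  induction l with
  | nil => intro d _; rfl
  | cons w t ih =>
    intro d h
    simp only [List.foldl_cons]
    by_cases hw : k == w
    · rw [if_pos hw]
      have hc : (d.modify k 0 (· + 1)).contains k = true := by
        rw [PySem.Dict.contains_modify]; simp
      rw [ih _ hc, keys_modify_of_contains d k _ h]
    · rw [if_neg hw]; exact ih _ h

-- A's outer loop over the key list
lemma outer_getD_keys (l : List String) :
    ∀ (ks : List String), ks.Nodup →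
    ∀ (d : PySem.Dict String Int), (∀ k ∈ ks, d.contains k = true) →
      ((ks.foldl (fun d key =>
          l.foldl (fun d w => if key == w then d.modify key 0 (· + 1) else d) d) d).keys = d.keys)
      ∧ ∀ v, (ks.foldl (fun d key =>
          l.foldl (fun d w => if key == w then d.modify key 0 (· + 1) else d) d) d).getD v 0
            = d.getD v 0 + (if v ∈ ks then (l.count v : Int) else 0) := by
  intro ks
  induction ks with
  | nil => intro _ d _; simp
  | cons k t ih =>
    intro hnd d hall
    have hk : d.contains k = true := hall k (List.mem_cons_self ..)
    have hkeys1 : (l.foldl (fun d w => if k == w then d.modify k 0 (· + 1) else d) d).keys = d.keys :=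
      inner_keys k l d hk
    have hall' : ∀ k' ∈ t, (l.foldl (fun d w => if k == w then d.modify k 0 (· + 1) else d) d).contains k' = true := by
      intro k' hk'
      have := hall k' (List.mem_cons_of_mem _ hk')
      rw [PySem.Dict.contains_iff_mem_keys] at this ⊢
      rw [hkeys1]; exact this
    obtain ⟨ihk, ihg⟩ := ih hnd.of_cons _ hall'
    simp only [List.foldl_cons]
    refine ⟨by rw [ihk, hkeys1], ?_⟩
    intro v
    rw [ihg v, inner_getD]
    by_cases hv : v = k
    · have hvt : k ∉ t := (List.nodup_cons.mp hnd).1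
      subst hv
      simp [hvt, List.mem_cons]
    · simp only [List.mem_cons, hv, false_or]
      simp

-- a dict with distinct keys is its key list paired with its getD values
lemma items_eq_keys_map_getD :
    ∀ (items : List (String × Int)), (items.map (·.1)).Nodup →
      items = (items.map (·.1)).map (fun k => (k, (PySem.Dict.mk items).getD k 0)) := by
  intro items
  induction items with
  | nil => intro _; rfl
  | cons p rest ih =>
    obtain ⟨a, b⟩ := p
    intro hnd
    rw [List.map_cons] at hnd
    obtain ⟨hp, hrest⟩ := List.nodup_cons.mp hnd
    simp only [List.map_cons]
    have hhead : (PySem.Dict.mk ((a, b) :: rest)).getD a 0 = b := by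
      simp [PySem.Dict.getD, PySem.Dict.get?_mk_cons]
    rw [hhead]
    have htail : (rest.map (·.1)).map (fun k => (k, (PySem.Dict.mk ((a, b) :: rest)).getD k 0))
        = (rest.map (·.1)).map (fun k => (k, (PySem.Dict.mk rest).getD k 0)) := by
      apply List.map_congr_left
      intro k hkmem
      have hne : (a == k) = false := by
        simp only [beq_eq_false_iff_ne, ne_eq]
        intro h; exact hp (h ▸ hkmem)
      simp [PySem.Dict.getD, PySem.Dict.get?_mk_cons, hne]
    rw [htail, ← ih hrest]

-- A's third loop computes "some value is exactly 2 / exactly 3" flags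
lemma flags_foldl (l : List String) (f : String → Int) :
    ∀ (a b : Int),
      l.foldl (fun (p : Int × Int) k =>
        if f k = 2 then ((1 : Int), p.2)
        else if f k = 3 then (p.1, (1 : Int))
        else p) (a, b)
      = ((if l.any (fun k => f k == 2) then 1 else a),
         (if l.any (fun k => f k == 3) then 1 else b)) := by
  induction l with
  | nil => intro a b; simp
  | cons k t ih =>
    intro a b
    simp only [List.foldl_cons, List.any_cons]
    by_cases h2 : f k = 2
    · simp [h2, ih]
    · by_cases h3 : f k = 3
      · simp [h3, ih]
      · simp [h2, h3, ih]

lemma contains_map_eq_any (s : List String) (f : String → Int) (v : Int) :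
    (s.map f).contains v = s.any (fun k => f k == v) := by
  rw [List.contains_eq_any_beq, List.any_map]
  exact List.any_congr rfl (fun k => by simp [Function.comp, eq_comm])

-- the core identity: A's fully counted dict is the one-pass counter
lemma d1_eq_counter (l : List String) :
    ((l.foldl (fun d word => d.insert word 0) (PySem.Dict.empty : PySem.Dict String Int)).keys.foldl
      (fun d key => l.foldl (fun d w => if key == w then d.modify key 0 (· + 1) else d) d)
      (l.foldl (fun d word => d.insert word 0) (PySem.Dict.empty : PySem.Dict String Int)))
    = PySem.Dict.counter l := by
  set d0 : PySem.Dict String Int := l.foldl (fun d word => d.insert word 0) (PySem.Dict.empty : PySem.Dict String Int) with hd0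
  have hkeys0 : d0.keys = PySem.Set.ofList l := by
    rw [hd0, PySem.Dict.keys_foldl_insert (f := fun _ _ => (0 : Int))]
    simp [PySem.Dict.empty, PySem.Dict.keys, PySem.Set.update_nil_left]
  have hnd : d0.keys.Nodup := by rw [hkeys0]; exact PySem.Set.nodup_ofList l
  have hall : ∀ k ∈ d0.keys, d0.contains k = true := by
    intro k hk; exact (PySem.Dict.contains_iff_mem_keys d0 k).mpr hk
  obtain ⟨hkeys, hgetD⟩ := outer_getD_keys l d0.keys hnd d0 hall
  set d1 := d0.keys.foldl
      (fun d key => l.foldl (fun d w => if key == w then d.modify key 0 (· + 1) else d) d) d0 with hd1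
  have hd0getD : ∀ v, d0.getD v 0 = 0 := by
    intro v
    exact getD_foldl_insert_zero l v PySem.Dict.empty (by simp [PySem.Dict.empty, PySem.Dict.getD, PySem.Dict.get?])
  have hd1keys : d1.keys = PySem.Set.ofList l := by rw [hkeys, hkeys0]
  apply PySem.Dict.ext
  have h1 : d1.items = d1.keys.map (fun k => (k, d1.getD k 0)) := by
    have := items_eq_keys_map_getD d1.items (by
      have : d1.items.map (·.1) = d1.keys := rfl
      rw [this, hd1keys]; exact PySem.Set.nodup_ofList l)
    simpa [PySem.Dict.keys] using this
  rw [h1, hd1keys, PySem.Dict.items_counter]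
  apply List.map_congr_left
  intro k hk
  have hkl : k ∈ PySem.Set.ofList l := hk
  rw [hgetD k, hd0getD k, hkeys0]
  simp [hkl]

-- ===== VERDICT (by name: the statement is the Claim_ definition above) =====
theorem result_spec : Claim_equal_result := by
  intro s _
  unfold Spec_result result result_alt
  simp only []
  set l := s.toList.map (fun c => String.mk [c]) with hl
  have hB : s.toList.foldl (fun d c =>
        d.insert (String.mk [c]) (d.getD (String.mk [c]) 0 + 1)) PySem.Dict.empty
      = PySem.Dict.counter l := by
    rw [← PySem.Dict.foldl_insert_getD_add_one_eq_counter, hl, List.foldl_map]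
  rw [hB]
  simp only [d1_eq_counter l]
  have hvals : (PySem.Dict.counter l).values = (PySem.Set.ofList l).map (fun k => ((l.count k : Int))) := by
    simp only [PySem.Dict.values, PySem.Dict.items_counter, List.map_map]
    rfl
  rw [flags_foldl _ (fun k => PySem.Dict.counter l |>.getD k 0), hvals,
      contains_map_eq_any, contains_map_eq_any, PySem.Dict.keys_counter]
  simp only [PySem.Dict.getD_counter]
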